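-- pv_equiv track=rewrite | github.com/rishabhjain02/Data-Structures-And-Algorithms | Game Theory/Make Palindrome.py | solve
-- ===== SOURCE A (Python) =====
-- from collections import defaultdict
--
-- def solve(A):
--     freq = defaultdict(int)
--     count_odd = 0
--
--     for c in A:
--         freq[c] += 1
--
--     for k in freq:
--         if freq[k] % 2 == 1:
--             count_odd += 1
--
--     if count_odd != 0 and count_odd % 2 == 0:
--         return 2
--     return 1
-- ===== SOURCE B (Python) =====
-- def solve(A):
--     # Divide-and-discard recursion: take the first character, add its count's
--     # parity, and recurse on the string with all its occurrences removed.
--     def odd_kinds(s):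
--         if not s:
--             return 0
--         c = s[0]
--         return s.count(c) % 2 + odd_kinds([x for x in s if x != c])
--     count_odd = odd_kinds(list(A))
--     if count_odd != 0 and count_odd % 2 == 0:
--         return 2
--     return 1
-- ===== Notes on version B (the rewrite author's own statement) =====
-- stated objective: alternative
-- what changed: Replaces the frequency dictionary and the second pass over its keys by a divide-and-discard recursion: count the first character's occurrences, add that count's parity, and recurse on the string with all those occurrences filtered out (no map/set container at all).
import Mathlib
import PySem

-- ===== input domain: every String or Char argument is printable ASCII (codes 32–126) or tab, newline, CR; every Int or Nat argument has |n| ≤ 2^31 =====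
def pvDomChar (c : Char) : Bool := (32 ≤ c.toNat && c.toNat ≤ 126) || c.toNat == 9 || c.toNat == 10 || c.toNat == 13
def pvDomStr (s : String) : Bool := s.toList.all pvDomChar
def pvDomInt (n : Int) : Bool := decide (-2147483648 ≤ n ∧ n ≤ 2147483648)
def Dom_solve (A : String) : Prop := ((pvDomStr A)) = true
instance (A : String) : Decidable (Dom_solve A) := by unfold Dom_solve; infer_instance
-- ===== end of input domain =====

-- B replaces A's frequency dict + key-counting pass by a divide-and-discard recursion
-- (count the first char, filter it out, recurse); return value only, no side effects.

-- ===== PORT A =====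
def solve (A : String) : Int :=
  let freq := A.toList.foldl (fun d c => d.modify c 0 (· + 1)) PySem.Dict.empty
  let count_odd : Int :=
    freq.keys.foldl (fun acc k => if PySem.Int.mod (freq.getD k 0) 2 = 1 then acc + 1 else acc) 0
  if count_odd ≠ 0 ∧ PySem.Int.mod count_odd 2 = 0 then 2 else 1

-- ===== PORT B =====
def oddKinds (s : List Char) : Int :=
  match s with
  | [] => 0
  | c :: t =>
    PySem.Int.mod ((c :: t).count c : Int) 2 + oddKinds ((c :: t).filter (fun x => x ≠ c))
termination_by s.length
decreasing_by
  simp only [List.filter_cons, ne_eq, not_true_eq_false, decide_false, List.length_cons]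
  exact Nat.lt_succ_of_le (List.length_filter_le _ _)

def solve_alt (A : String) : Int :=
  let count_odd : Int := oddKinds A.toList
  if count_odd ≠ 0 ∧ PySem.Int.mod count_odd 2 = 0 then 2 else 1

-- ===== PRECONDITION & SPEC =====
def Spec_solve (A : String) (out : Int) : Prop := out = solve_alt A
instance (A : String) (out : Int) : Decidable (Spec_solve A out) := by unfold Spec_solve; infer_instance

-- ===== CLAIM (what is proved, stated in full; the proofs are below) =====
def Claim_equal_solve : Prop := ∀ (A : String), Dom_solve A → Spec_solve A (solve A)

-- ===== LEMMAS AND PROOFS =====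

-- A's second loop counts the distinct characters with an odd frequency.
theorem countA_eq (l : List Char) :
    ((PySem.Dict.counter l).keys.foldl
      (fun acc k => if PySem.Int.mod ((PySem.Dict.counter l).getD k 0) 2 = 1 then acc + 1 else acc) (0 : Int))
    = ((PySem.Set.ofList l).countP (fun k => decide (l.count k % 2 = 1)) : Int) := by
  rw [PySem.List.foldl_ite_add_one]
  simp only [PySem.Dict.keys_counter, PySem.Dict.getD_counter]
  rw [zero_add]
  norm_cast
  apply List.countP_congr
  intro k _
  have hm : PySem.Int.mod ((l.count k : Int)) 2 = ((l.count k % 2 : Nat) : Int) :=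
    PySem.Int.mod_natCast _ _
  simp only [decide_eq_true_eq, hm]
  omega

-- B's recursion also counts the distinct characters with an odd frequency.
theorem oddKinds_eq (s : List Char) :
    oddKinds s = ((PySem.Set.ofList s).countP (fun k => decide (s.count k % 2 = 1)) : Int) := by
  induction s using oddKinds.induct with
  | case1 => simp [oddKinds, PySem.Set.ofList_nil]
  | case2 c t ih =>
    rw [oddKinds, ih]
    set l := c :: t with hl
    set l' := l.filter (fun x => x ≠ c) with hl'
    -- left summand: the parity of c's count
    have hc : PySem.Int.mod ((l.count c : Int)) 2 = ((l.count c % 2 : Nat) : Int) :=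
      PySem.Int.mod_natCast _ _
    -- the two dedup lists without c have the same members and are both nodup
    have hperm : ((PySem.Set.ofList l).filter (fun x => x ≠ c)).Perm (PySem.Set.ofList l') := by
      apply (List.perm_ext_iff_of_nodup
        (List.Nodup.filter _ (PySem.Set.nodup_ofList l)) (PySem.Set.nodup_ofList l')).mpr
      intro k
      simp only [List.mem_filter, PySem.Set.mem_ofList, hl', List.mem_filter,
        decide_eq_true_eq, ne_eq]
    -- rewrite countP over ofList l' as countP over the filter, with the same predicate
    have hcnt : ∀ k, k ≠ c → l'.count k = l.count k := by
      intro k hk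
      rw [hl', List.count_filter]
      simp [hk]
    have h2 : ((PySem.Set.ofList l').countP (fun k => decide (l'.count k % 2 = 1)))
        = ((PySem.Set.ofList l).filter (fun x => x ≠ c)).countP
            (fun k => decide (l.count k % 2 = 1)) := by
      rw [← hperm.countP_eq]
      apply List.countP_congr
      intro k hk
      have hkc : k ≠ c := by
        have := (List.mem_filter.mp hk).2
        simpa using this
      rw [hcnt k hkc]
    rw [h2]
    -- split countP over ofList l into the c-part and the rest
    have hmemc : c ∈ PySem.Set.ofList l := by
      rw [PySem.Set.mem_ofList, hl]; exact List.mem_cons_self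
    have hsplit : ((PySem.Set.ofList l).countP (fun k => decide (l.count k % 2 = 1)))
        = (if l.count c % 2 = 1 then 1 else 0)
          + ((PySem.Set.ofList l).filter (fun x => x ≠ c)).countP
              (fun k => decide (l.count k % 2 = 1)) := by
      rw [PySem.Set.ofList_cons]
      simp only [List.countP_cons, List.filter_cons, hl]
      have hnotc : ¬ ((c : Char) ≠ c) := by simp
      simp only [ne_eq, not_true_eq_false, decide_false, Bool.false_eq_true, if_false]
      have hd : (PySem.Set.discard (PySem.Set.ofList t) c).filter (fun x => x ≠ c)
          = PySem.Set.discard (PySem.Set.ofList t) c := by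
        apply List.filter_eq_self.mpr
        intro a ha
        have := ((PySem.Set.mem_discard _ _ _).mp ha).2
        simpa using this
      rw [hd]
      by_cases hodd : (c :: t).count c % 2 = 1 <;> simp [Nat.add_comm]
    rw [hsplit, hc]
    push_cast
    have : (l.count c : Int) % 2 = ((l.count c % 2 : Nat) : Int) := by omega
    by_cases hodd : l.count c % 2 = 1 <;> simp [hodd] <;> omega

-- ===== VERDICT (by name: the statement is the Claim_ definition above) =====
theorem solve_spec : Claim_equal_solve := by
  intro A _
  unfold Spec_solve solve solve_alt
  have hc : (A.toList.foldl (fun d c => d.modify c 0 (· + 1)) PySem.Dict.empty)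
      = PySem.Dict.counter A.toList := (PySem.Dict.counter_eq_foldl A.toList).symm
  simp only [hc]
  rw [countA_eq A.toList, ← oddKinds_eq A.toList]
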